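-- pv_equiv track=rewrite | github.com/smallflyingpig/universal_adversarial_perturbation_generative_network_for_speaker_recognition | common/prepare_dataset.py | chunk_file_with_phone
-- ===== SOURCE A (Python) =====
-- def chunk_file_with_phone(wav_data, phn_label, fs, wlen, wshift):
--     wlen = int((fs*wlen)/1000) # ms to hz
--     wshift = int((fs*wshift)/1000) # ms to hz
--
--     offsets = []
--     labels = []
--
--     cur_idx = 0
--     beg_sample = phn_label[0][0]
--     length = min(len(wav_data), phn_label[-1][1])
--     while beg_sample+wlen<length and cur_idx<len(phn_label):
--         center = beg_sample+wlen//2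
--         if center<phn_label[cur_idx][1]:
--             label = phn_label[cur_idx][2]
--             offset = beg_sample
--             labels.append(label)
--             offsets.append(offset)
--             beg_sample += wshift
--         else:
--             cur_idx += 1
--     assert len(offsets)==len(labels)
--     return offsets, labels
-- ===== SOURCE B (Python) =====
-- def chunk_file_with_phone(wav_data, phn_label, fs, wlen, wshift):
--     wlen = int((fs*wlen)/1000) # ms to samples
--     wshift = int((fs*wshift)/1000) # ms to samples
--
--     length = min(len(wav_data), phn_label[-1][1])
--
--     offsets = []
--     labels = []
--     # window begins in closed form; a non-positive converted shift yields no windows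
--     if wshift > 0:
--         for beg in range(phn_label[0][0], length - wlen, wshift):
--             center = beg + wlen // 2
--             # stateless per-window search: first segment whose end lies beyond the center
--             label = None
--             for seg in phn_label:
--                 if center < seg[1]:
--                     label = seg[2]
--                     break
--             if label is None:
--                 break
--             offsets.append(beg)
--             labels.append(label)
--     return offsets, labels
-- ===== Notes on version B (the rewrite author's own statement) =====
-- stated objective: alternative
-- what changed: A runs one merged two-pointer sweep whose state couples the window position and a forward segment pointer; B has no pointer at all: the window begins come from a closed-form range (empty for a non-positive converted shift) and each window independently gets its label by a from-scratch first-match scan over the segment list (brute force per window); this is correct because a segment A's pointer skips has end <= the then-current center, and centers never decrease when the shift is positive, so the first segment with end > center is exactly A's pointer position.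
-- outside the precondition, e.g. on chunk_file_with_phone([], [(0, 1, 'a')], 2147483647, 2147483647, 2147483647): A returns ([], []), B returns ([], [])
import Mathlib
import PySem

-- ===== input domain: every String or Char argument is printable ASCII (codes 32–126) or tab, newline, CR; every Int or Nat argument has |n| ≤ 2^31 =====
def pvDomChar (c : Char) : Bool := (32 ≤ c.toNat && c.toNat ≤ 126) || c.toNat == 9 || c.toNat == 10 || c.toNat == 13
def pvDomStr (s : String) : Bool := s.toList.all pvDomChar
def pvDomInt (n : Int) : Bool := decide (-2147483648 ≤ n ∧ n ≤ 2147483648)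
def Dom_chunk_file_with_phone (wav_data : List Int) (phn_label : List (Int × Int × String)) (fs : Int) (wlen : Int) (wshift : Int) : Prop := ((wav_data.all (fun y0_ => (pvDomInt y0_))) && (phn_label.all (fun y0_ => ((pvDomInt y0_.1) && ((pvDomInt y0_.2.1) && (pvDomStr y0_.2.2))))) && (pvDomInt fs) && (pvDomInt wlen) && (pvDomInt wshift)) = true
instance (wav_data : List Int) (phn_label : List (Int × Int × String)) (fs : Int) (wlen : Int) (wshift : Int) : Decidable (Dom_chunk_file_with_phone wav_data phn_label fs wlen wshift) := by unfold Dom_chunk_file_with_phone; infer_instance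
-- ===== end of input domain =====

-- B removes A's stateful two-pointer sweep: window begins come from a closed-form range and each
-- window's label is found by an independent from-scratch first-match scan over the segment list
-- (brute force per window); same return value, different algorithm (objective: alternative).


-- ===== PORT A =====
-- A's while-loop, state (beg_sample, cur_idx, offsets, labels); fuel only makes it total in Lean
-- (under Pre_ the loop performs fewer iterations than the fuel supplied below).
def chunkLoopA (phn : List (Int × Int × String)) (length wlenS wshiftS : Int) :
    Nat → Int → Nat → List Int → List String → List Int × List String
  | 0, _, _, offs, labs => (offs, labs)
  | fuel+1, beg, idx, offs, labs =>
    if beg + wlenS < length ∧ idx < phn.length then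
      let center := beg + PySem.Int.floordiv wlenS 2
      let seg := PySem.List.pyGetD phn (idx : Int) (0, 0, "")
      if center < seg.2.1 then
        chunkLoopA phn length wlenS wshiftS fuel (beg + wshiftS) idx (offs ++ [beg]) (labs ++ [seg.2.2])
      else
        chunkLoopA phn length wlenS wshiftS fuel beg (idx + 1) offs labs
    else (offs, labs)

def chunk_file_with_phone (wav_data : List Int) (phn_label : List (Int × Int × String)) (fs : Int) (wlen : Int) (wshift : Int) : List Int × List String :=
  let wlenS := PySem.Int.truncdiv (fs * wlen) 1000    -- int((fs*wlen)/1000), exact under Pre_'s 2^53 bound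
  let wshiftS := PySem.Int.truncdiv (fs * wshift) 1000
  let beg0 := (PySem.List.pyGetD phn_label 0 (0, 0, "")).1
  let length := min (PySem.List.len wav_data) (PySem.List.pyGetD phn_label (-1) (0, 0, "")).2.1
  chunkLoopA phn_label length wlenS wshiftS ((length - wlenS - beg0).toNat + phn_label.length) beg0 0 [] []

-- ===== PORT B =====
-- the inner 'for seg in phn_label: if center < seg[1]: label = seg[2]; break'
def firstLabel : List (Int × Int × String) → Int → Option String
  | [], _ => none
  | s :: t, c => if c < s.2.1 then some s.2.2 else firstLabel t c

-- the 'for beg in range(...)' loop with its early break on label is None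
def chunkLoopB (phn : List (Int × Int × String)) (wlenS : Int) :
    List Int → List Int → List String → List Int × List String
  | [], offs, labs => (offs, labs)
  | off :: rest, offs, labs =>
    match firstLabel phn (off + PySem.Int.floordiv wlenS 2) with
    | none => (offs, labs)
    | some lab => chunkLoopB phn wlenS rest (offs ++ [off]) (labs ++ [lab])

def chunk_file_with_phone_alt (wav_data : List Int) (phn_label : List (Int × Int × String)) (fs : Int) (wlen : Int) (wshift : Int) : List Int × List String :=
  let wlenS := PySem.Int.truncdiv (fs * wlen) 1000
  let wshiftS := PySem.Int.truncdiv (fs * wshift) 1000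
  let length := min (PySem.List.len wav_data) (PySem.List.pyGetD phn_label (-1) (0, 0, "")).2.1
  let candidates := if 0 < wshiftS then PySem.List.pyRange (PySem.List.pyGetD phn_label 0 (0, 0, "")).1 (length - wlenS) wshiftS else []
  chunkLoopB phn_label wlenS candidates [] []

-- ===== PRECONDITION & SPEC =====
-- Pre_ excludes: empty phn_label (A raises IndexError); |fs*wlen| or |fs*wshift| ≥ 2^53, where
-- int((fs*w)/1000) goes through float division whose rounding the integer ports do not model;
-- and, when the converted shift is < 1 sample (fs*wshift < 1000), exactly the inputs on which A
-- loops forever, namely those where a window fits and some segment end exceeds the first center.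
def Pre_chunk_file_with_phone (wav_data : List Int) (phn_label : List (Int × Int × String)) (fs : Int) (wlen : Int) (wshift : Int) : Prop :=
  phn_label ≠ [] ∧ (fs * wlen).natAbs < 2 ^ 53 ∧ (fs * wshift).natAbs < 2 ^ 53 ∧
    (1000 ≤ fs * wshift ∨
      ¬ ((PySem.List.pyGetD phn_label 0 (0, 0, "")).1 + PySem.Int.truncdiv (fs * wlen) 1000
          < min (PySem.List.len wav_data) (PySem.List.pyGetD phn_label (-1) (0, 0, "")).2.1) ∨
      ∀ seg ∈ phn_label,
        seg.2.1 ≤ (PySem.List.pyGetD phn_label 0 (0, 0, "")).1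
          + PySem.Int.floordiv (PySem.Int.truncdiv (fs * wlen) 1000) 2)
instance (wav_data : List Int) (phn_label : List (Int × Int × String)) (fs : Int) (wlen : Int) (wshift : Int) : Decidable (Pre_chunk_file_with_phone wav_data phn_label fs wlen wshift) := by unfold Pre_chunk_file_with_phone; infer_instance

def pvWitness_chunk_file_with_phone : List Int × (List (Int × Int × String)) × Int × Int × Int :=
  ([0, 1, 2, 3, 4, 5, 6, 7], [(0, 4, "sil"), (4, 8, "aa")], 1000, 3, 2)

def Spec_chunk_file_with_phone (wav_data : List Int) (phn_label : List (Int × Int × String)) (fs : Int) (wlen : Int) (wshift : Int) (out : List Int × List String) : Prop := out = chunk_file_with_phone_alt wav_data phn_label fs wlen wshift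
instance (wav_data : List Int) (phn_label : List (Int × Int × String)) (fs : Int) (wlen : Int) (wshift : Int) (out : List Int × List String) : Decidable (Spec_chunk_file_with_phone wav_data phn_label fs wlen wshift out) := by unfold Spec_chunk_file_with_phone; infer_instance

-- ===== CLAIM (what is proved, stated in full; the proofs are below) =====
def Claim_equal_chunk_file_with_phone : Prop := ∀ (wav_data : List Int) (phn_label : List (Int × Int × String)) (fs : Int) (wlen : Int) (wshift : Int), Dom_chunk_file_with_phone wav_data phn_label fs wlen wshift → Pre_chunk_file_with_phone wav_data phn_label fs wlen wshift → Spec_chunk_file_with_phone wav_data phn_label fs wlen wshift (chunk_file_with_phone wav_data phn_label fs wlen wshift)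

-- ===== LEMMAS AND PROOFS =====
lemma pyRange_pos_nil (a b s : Int) (hs : 0 < s) (hab : b ≤ a) :
    PySem.List.pyRange a b s = [] := by
  rw [PySem.List.pyRange_of_pos a b hs, if_neg (by omega : ¬ a < b)]
  simp

lemma pyRange_pos_cons (a b s : Int) (hs : 0 < s) (hab : a < b) :
    PySem.List.pyRange a b s = a :: PySem.List.pyRange (a + s) b s := by
  rw [PySem.List.pyRange_of_pos a b hs, PySem.List.pyRange_of_pos (a + s) b hs]
  have hcnt : (if a + s < b then ((b - (a + s) + s - 1) / s).toNat else 0)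
      = ((b - a - 1) / s).toNat := by
    split_ifs with h
    · ring_nf
    · have h1 : b - a - 1 < s := by omega
      have h2 : 0 ≤ b - a - 1 := by omega
      rw [Int.ediv_eq_zero_of_lt h2 h1]; rfl
  have hmain : (if a < b then ((b - a + s - 1) / s).toNat else 0)
      = ((b - a - 1) / s).toNat + 1 := by
    rw [if_pos hab]
    have : b - a + s - 1 = (b - a - 1) + 1 * s := by ring
    rw [this, Int.add_mul_ediv_right _ _ (by omega : s ≠ 0)]
    have : 0 ≤ (b - a - 1) / s := Int.ediv_nonneg (by omega) (by omega)
    omega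
  rw [hcnt, hmain, List.range_succ_eq_map, List.map_cons, List.map_map]
  congr 1
  · simp
  · apply List.map_congr_left
    intro k _
    simp only [Function.comp]
    push_cast
    ring

-- skipping a prefix of segments whose ends are at or below the center does not change the search
lemma firstLabel_drop (phn : List (Int × Int × String)) (c : Int) :
    ∀ (idx : Nat), idx ≤ phn.length →
      (∀ (j : Nat) (hj : j < phn.length), j < idx → (phn[j]'hj).2.1 ≤ c) →
      firstLabel phn c = firstLabel (phn.drop idx) c := by
  intro idx
  induction idx with
  | zero => intro _ _; simp
  | succ n ih =>
    intro hle hall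
    rw [ih (by omega) (fun j hj hjn => hall j hj (by omega))]
    rw [List.drop_eq_getElem_cons (by omega : n < phn.length)]
    rw [firstLabel, if_neg (not_lt.mpr (hall n (by omega) (by omega)))]

-- main simulation: A's merged two-pointer loop equals B's range-then-search, given a positive
-- shift, enough fuel, and the invariant that skipped segments end at or below the current center
lemma loopA_eq_loopB (phn : List (Int × Int × String)) (length wlenS wshiftS : Int)
    (hs : 1 ≤ wshiftS) :
    ∀ (fuel : Nat) (beg : Int) (idx : Nat) (offs : List Int) (labs : List String),
      (length - wlenS - beg).toNat + (phn.length - idx) ≤ fuel →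
      idx ≤ phn.length →
      (∀ (j : Nat) (hj : j < phn.length), j < idx →
        (phn[j]'hj).2.1 ≤ beg + PySem.Int.floordiv wlenS 2) →
      chunkLoopA phn length wlenS wshiftS fuel beg idx offs labs
        = chunkLoopB phn wlenS (PySem.List.pyRange beg (length - wlenS) wshiftS) offs labs := by
  intro fuel
  induction fuel with
  | zero =>
    intro beg idx offs labs hfuel hle hall
    have h1 : length - wlenS ≤ beg := by omega
    rw [pyRange_pos_nil _ _ _ (by omega) h1]
    simp [chunkLoopA, chunkLoopB]
  | succ fuel ih =>
    intro beg idx offs labs hfuel hle hall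
    by_cases hbeg : beg + wlenS < length
    · rw [pyRange_pos_cons beg (length - wlenS) wshiftS (by omega) (by omega)]
      by_cases hidx : idx < phn.length
      · have hget : PySem.List.pyGetD phn (idx : Int) (0, 0, "") = phn[idx] := by
          rw [PySem.List.pyGetD_natCast, List.getD_eq_getElem _ _ hidx]
        rw [chunkLoopA]
        simp only [if_pos (And.intro hbeg hidx), hget]
        by_cases hc : beg + PySem.Int.floordiv wlenS 2 < phn[idx].2.1
        · rw [if_pos hc, chunkLoopB]
          have hfl : firstLabel phn (beg + PySem.Int.floordiv wlenS 2) = some phn[idx].2.2 := by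
            rw [firstLabel_drop phn _ idx (by omega) hall,
              List.drop_eq_getElem_cons hidx, firstLabel, if_pos hc]
          rw [hfl]
          exact ih (beg + wshiftS) idx _ _ (by omega) hle
            (fun j hj hjn => le_trans (hall j hj hjn) (by omega))
        · rw [if_neg hc]
          rw [← pyRange_pos_cons beg (length - wlenS) wshiftS (by omega) (by omega)]
          exact ih beg (idx + 1) offs labs (by omega) (by omega)
            (fun j hj hjn => by
              rcases Nat.lt_succ_iff_lt_or_eq.mp hjn with h | h
              · exact hall j hj h
              · subst h; exact not_lt.mp hc)
      · rw [chunkLoopA]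
        simp only [if_neg (by tauto : ¬ (beg + wlenS < length ∧ idx < phn.length))]
        rw [chunkLoopB]
        have hfl : firstLabel phn (beg + PySem.Int.floordiv wlenS 2) = none := by
          rw [firstLabel_drop phn _ phn.length le_rfl
            (fun j hj _ => hall j hj (by omega)), List.drop_length]
          rfl
        rw [hfl]
    · rw [pyRange_pos_nil _ _ _ (by omega) (by omega)]
      rw [chunkLoopA, chunkLoopB]
      simp only [if_neg (by tauto : ¬ (beg + wlenS < length ∧ idx < phn.length))]

-- A's loop returns its accumulator unchanged as soon as no window fits
lemma loopA_stop_nofit (phn : List (Int × Int × String)) (length wlenS wshiftS : Int)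
    (fuel : Nat) (beg : Int) (idx : Nat) (offs : List Int) (labs : List String)
    (h : ¬ beg + wlenS < length) :
    chunkLoopA phn length wlenS wshiftS fuel beg idx offs labs = (offs, labs) := by
  cases fuel with
  | zero => rfl
  | succ fuel => rw [chunkLoopA]; simp only [if_neg (by tauto : ¬ (beg + wlenS < length ∧ idx < phn.length))]

-- if every segment end is at or before the window center, A's loop only advances the pointer
lemma loopA_only_advances (phn : List (Int × Int × String)) (length wlenS wshiftS : Int)
    (beg : Int) (hall : ∀ seg ∈ phn, seg.2.1 ≤ beg + PySem.Int.floordiv wlenS 2) :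
    ∀ (fuel : Nat) (idx : Nat) (offs : List Int) (labs : List String),
      chunkLoopA phn length wlenS wshiftS fuel beg idx offs labs = (offs, labs) := by
  intro fuel
  induction fuel with
  | zero => intro idx offs labs; rfl
  | succ fuel ih =>
    intro idx offs labs
    rw [chunkLoopA]
    by_cases hcond : beg + wlenS < length ∧ idx < phn.length
    · rw [if_pos hcond]
      have hmem : PySem.List.pyGetD phn (idx : Int) (0, 0, "") ∈ phn :=
        PySem.List.pyGetD_mem _ _ (by constructor <;> omega)
      rw [if_neg (not_lt.mpr (hall _ hmem))]
      exact ih (idx + 1) offs labs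
    · rw [if_neg hcond]

-- ===== VERDICT (by name: the statement is the Claim_ definition above) =====
theorem chunk_file_with_phone_spec : Claim_equal_chunk_file_with_phone := by
  intro wav_data phn_label fs wlen wshift _hdom hpre
  obtain ⟨hne, _, _, hcase⟩ := hpre
  unfold Spec_chunk_file_with_phone chunk_file_with_phone chunk_file_with_phone_alt
  dsimp only
  by_cases hshift : 1000 ≤ fs * wshift
  · have hs : 1 ≤ PySem.Int.truncdiv (fs * wshift) 1000 := by
      unfold PySem.Int.truncdiv
      rw [Int.tdiv_eq_ediv_of_nonneg (by omega : (0:Int) ≤ fs * wshift)]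
      rw [Int.le_ediv_iff_mul_le (by omega : (0:Int) < 1000)]
      omega
    rw [if_pos (by omega : (0:Int) < PySem.Int.truncdiv (fs * wshift) 1000)]
    exact loopA_eq_loopB _ _ _ _ hs _ _ 0 _ _ (by omega) (by omega) (by omega)
  · have hs0 : PySem.Int.truncdiv (fs * wshift) 1000 ≤ 0 := by
      unfold PySem.Int.truncdiv
      by_cases h0 : 0 ≤ fs * wshift
      · rw [Int.tdiv_eq_ediv_of_nonneg h0, Int.ediv_eq_zero_of_lt h0 (by omega)]
      · have h2 : (fs * wshift).tdiv 1000 ≤ Int.tdiv 0 1000 :=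
          Int.tdiv_le_tdiv (by omega) (by omega)
        simpa using h2
    rw [if_neg (by omega : ¬ (0:Int) < PySem.Int.truncdiv (fs * wshift) 1000)]
    show chunkLoopA phn_label _ _ _ _ _ 0 [] [] = chunkLoopB phn_label _ [] [] []
    rw [chunkLoopB]
    rcases hcase with hcase | hcase | hcase
    · omega
    · exact loopA_stop_nofit _ _ _ _ _ _ _ _ _ hcase
    · exact loopA_only_advances _ _ _ _ _ hcase _ _ _ _
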